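-- pv_equiv track=rewrite | github.com/atha333/Path-Finding-and-Hide-and-Seek | arrange_pichus.py | row_invalid_list
-- ===== SOURCE A (Python) =====
-- def row_invalid_list(house_map):
--     loc_p = [(row,col) for col in range(len(house_map[0])) for row in range(len(house_map)) if house_map[row][col]=="p"]
--
--     row_count=len(house_map) #No of rows
--     col_count=len(house_map[0]) #No of columns
--     invalid_coord_in_rows=[]
--
--     #Repeat for all positions of p
--     for location in loc_p:
--         i=location[1] #iterator position starting at c
--         r=location[0] #row position for the agent
--         c=location[1] #column position for the agent
--
--         #Traveling along the same row from c to last column.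
--         while i<col_count-1:
--             if house_map[r][i+1] in 'X@':
--                 break
--             elif house_map[r][i+1]=='.':
--                 invalid_coord_in_rows.append((r,i+1))
--             i+=1
--         j=location[1] #column position for the agent
--
--         #Traveling along the same row from c to column 0.
--         while j>0:
--             if house_map[r][j-1] in 'X@':
--                 break
--             elif house_map[r][j-1]=='.':
--                 invalid_coord_in_rows.append((r,j-1))
--             j-=1
--
--     return invalid_coord_in_rows
-- ===== SOURCE B (Python) =====
-- def row_invalid_list(house_map):
--     H = len(house_map)
--     W = len(house_map[0])
--     # per row: seg[c] = number of walls at columns <= c, and a dict mapping each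
--     # segment id to the ascending list of '.' columns lying in that segment
--     rows = []
--     for row in house_map:
--         seg = []
--         sid = 0
--         for c in range(W):
--             if row[c] == 'X' or row[c] == '@':
--                 sid += 1
--             seg.append(sid)
--         dots = {}
--         for c in range(W):
--             if row[c] == '.':
--                 dots.setdefault(seg[c], []).append(c)
--         rows.append((seg, dots))
--     out = []
--     for c in range(W):
--         for r in range(H):
--             if house_map[r][c] == 'p':
--                 seg, dots = rows[r]
--                 ds = dots.get(seg[c], [])
--                 for d in ds:
--                     if d > c:
--                         out.append((r, d))
--                 for d in reversed(ds):
--                     if d < c: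
--                         out.append((r, d))
--     return out
-- ===== Notes on version B (the rewrite author's own statement) =====
-- stated objective: alternative
-- what changed: Instead of re-scanning the row leftwards and rightwards from every pichu (A's two while loops per 'p'), B precomputes per row a wall-count segment id for every column and a dict from segment id to its ascending '.' columns, then reads each pichu's reachable dots straight off its segment's dot list.
import Mathlib
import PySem

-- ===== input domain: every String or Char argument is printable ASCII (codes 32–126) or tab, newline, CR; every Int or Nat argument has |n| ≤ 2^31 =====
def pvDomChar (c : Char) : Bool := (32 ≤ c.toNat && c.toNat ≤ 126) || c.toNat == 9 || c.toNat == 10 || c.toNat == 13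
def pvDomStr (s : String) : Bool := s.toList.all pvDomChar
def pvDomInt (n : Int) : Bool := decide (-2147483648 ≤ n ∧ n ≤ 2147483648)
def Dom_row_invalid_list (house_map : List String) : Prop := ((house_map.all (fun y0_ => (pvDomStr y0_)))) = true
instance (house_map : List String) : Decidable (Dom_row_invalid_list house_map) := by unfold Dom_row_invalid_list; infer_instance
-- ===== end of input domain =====

-- B replaces A's per-pichu left/right row scans by a per-row precomputation (wall-count
-- segment ids plus a dict from segment id to its '.' columns) and reads each pichu's
-- answer off its row's segment dot list; objective: alternative algorithm, same cost.

-- ===== PORT A =====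
-- ch in 'X@'
def rilWall (ch : Char) : Bool := ch == 'X' || ch == '@'

-- the first while loop: i from c rightwards while i < col_count - 1
def rilScanR (l : List Char) (W : Nat) (r : Int) (i : Nat) (acc : List (Int × Int)) :
    List (Int × Int) :=
  if _h : i + 1 < W then
    if rilWall (l.getD (i + 1) ' ') then acc
    else if l.getD (i + 1) ' ' == '.' then
      rilScanR l W r (i + 1) (acc ++ [(r, ((i + 1 : Nat) : Int))])
    else rilScanR l W r (i + 1) acc
  else acc
termination_by W - i

-- the second while loop: j from c leftwards while j > 0
def rilScanL (l : List Char) (r : Int) (j : Nat) (acc : List (Int × Int)) :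
    List (Int × Int) :=
  match j with
  | 0 => acc
  | j' + 1 =>
    if rilWall (l.getD j' ' ') then acc
    else if l.getD j' ' ' == '.' then rilScanL l r j' (acc ++ [(r, (j' : Int))])
    else rilScanL l r j' acc

-- loc_p: column-major list of 'p' positions
def rilLocP (house_map : List String) : List (Nat × Nat) :=
  (List.range (house_map.headD "").toList.length).flatMap (fun col =>
    (List.range house_map.length).filterMap (fun row =>
      if (house_map.getD row "").toList.getD col ' ' == 'p' then some (row, col) else none))

def row_invalid_list (house_map : List String) : List (Int × Int) :=
  let W := (house_map.headD "").toList.length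
  (rilLocP house_map).foldl
    (fun acc rc =>
      let l := (house_map.getD rc.1 "").toList
      rilScanL l (rc.1 : Int) rc.2 (rilScanR l W (rc.1 : Int) rc.2 acc))
    []

-- ===== PORT B =====
-- per-row pass 1: seg[c] = number of walls at columns ≤ c (the running counter sid)
def rilSeg (l : List Char) (W : Nat) : List Nat :=
  ((List.range W).foldl
    (fun (st : Nat × List Nat) c =>
      let sid := if rilWall (l.getD c ' ') then st.1 + 1 else st.1
      (sid, st.2 ++ [sid]))
    (0, [])).2

-- per-row pass 2: dots.setdefault(seg[c], []).append(c) for each '.' column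
def rilDots (l : List Char) (W : Nat) (seg : List Nat) : PySem.Dict Nat (List Nat) :=
  (List.range W).foldl
    (fun d c =>
      if l.getD c ' ' == '.' then d.modify (seg.getD c 0) [] (fun v => v ++ [c]) else d)
    PySem.Dict.empty

-- rows: the (seg, dots) pair for every row, computed once
def rilRows (hm : List String) : List (List Nat × PySem.Dict Nat (List Nat)) :=
  hm.map (fun s =>
    (rilSeg s.toList (hm.headD "").toList.length,
     rilDots s.toList (hm.headD "").toList.length (rilSeg s.toList (hm.headD "").toList.length)))

-- ds = dots.get(seg[c], []) for the pichu at (r, c)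
def rilDs (hm : List String) (r c : Nat) : List Nat :=
  ((rilRows hm).getD r ([], PySem.Dict.empty)).2.getD
    (((rilRows hm).getD r ([], PySem.Dict.empty)).1.getD c 0) []

-- the two output loops for one pichu: dots right of c in order, then dots left of c reversed
def rilEmit (hm : List String) (r c : Nat) (acc : List (Int × Int)) : List (Int × Int) :=
  (rilDs hm r c).reverse.foldl
    (fun a3 d => if d < c then a3 ++ [((r : Int), (d : Int))] else a3)
    ((rilDs hm r c).foldl
      (fun a3 d => if c < d then a3 ++ [((r : Int), (d : Int))] else a3) acc)

def row_invalid_list_alt (house_map : List String) : List (Int × Int) :=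
  (List.range (house_map.headD "").toList.length).foldl (fun acc c =>
    (List.range house_map.length).foldl (fun acc2 r =>
      if (house_map.getD r "").toList.getD c ' ' == 'p' then rilEmit house_map r c acc2
      else acc2) acc) []

-- ===== PRECONDITION & SPEC =====
-- Pre_ excludes exactly the inputs where the Python A raises IndexError: the empty list
-- (house_map[0]) and maps with a row shorter than row 0 (house_map[row][col] in loc_p).
def Pre_row_invalid_list (house_map : List String) : Prop :=
  house_map ≠ [] ∧ ∀ s ∈ house_map, (house_map.headD "").toList.length ≤ s.toList.length
instance (house_map : List String) : Decidable (Pre_row_invalid_list house_map) := by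
  unfold Pre_row_invalid_list; infer_instance
def pvWitness_row_invalid_list : List String := ["p.X.", ".p.."]

def Spec_row_invalid_list (house_map : List String) (out : List (Int × Int)) : Prop := out = row_invalid_list_alt house_map
instance (house_map : List String) (out : List (Int × Int)) : Decidable (Spec_row_invalid_list house_map out) := by unfold Spec_row_invalid_list; infer_instance

-- ===== CLAIM (what is proved, stated in full; the proofs are below) =====
def Claim_equal_row_invalid_list : Prop := ∀ (house_map : List String), Dom_row_invalid_list house_map → Pre_row_invalid_list house_map → Spec_row_invalid_list house_map (row_invalid_list house_map)

-- ===== LEMMAS AND PROOFS =====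

-- number of wall characters among columns 0..k-1 (reading off the end as ' ')
def rilWC (l : List Char) (k : Nat) : Nat :=
  (List.range k).countP (fun d => rilWall (l.getD d ' '))

lemma rilWC_succ (l : List Char) (k : Nat) :
    rilWC l (k + 1) = rilWC l k + (if rilWall (l.getD k ' ') then 1 else 0) := by
  simp [rilWC, List.range_succ, List.countP_append]

lemma rilWC_mono (l : List Char) {i j : Nat} (h : i ≤ j) : rilWC l i ≤ rilWC l j := by
  induction j with
  | zero => have : i = 0 := by omega
            subst this; exact le_rfl
  | succ j ih =>
    by_cases h' : i ≤ j
    · calc rilWC l i ≤ rilWC l j := ih h'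
        _ ≤ rilWC l (j + 1) := by rw [rilWC_succ]; split <;> omega
    · have : i = j + 1 := by omega
      subst this; exact le_rfl

lemma rilWall_ne_dot {ch : Char} (h : rilWall ch = true) : (ch == '.') = false := by
  simp [rilWall] at h
  rcases h with h | h <;> subst h <;> decide

-- ---- A-side characterisations ----

lemma rilScanR_acc (l : List Char) (W : Nat) (r : Int) :
    ∀ n i acc, W - i ≤ n → rilScanR l W r i acc = acc ++ rilScanR l W r i [] := by
  intro n
  induction n with
  | zero =>
    intro i acc h
    have hn : ¬ (i + 1 < W) := by omega
    rw [rilScanR]; conv_rhs => rw [rilScanR]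
    simp [hn]
  | succ n ih =>
    intro i acc h
    rw [rilScanR]; conv_rhs => rw [rilScanR]
    by_cases h1 : i + 1 < W
    · simp only [dif_pos h1]
      by_cases hw : rilWall (l.getD (i + 1) ' ')
      · simp only [hw, if_true, List.append_nil]
      · by_cases hd : l.getD (i + 1) ' ' == '.'
        · simp only [hw, Bool.false_eq_true, if_false, hd, if_true]
          rw [ih (i + 1) (acc ++ [(r, ((i + 1 : Nat) : Int))]) (by omega),
              ih (i + 1) ([] ++ [(r, ((i + 1 : Nat) : Int))]) (by omega)]
          simp
        · simp only [hw, Bool.false_eq_true, if_false, hd]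
          rw [ih (i + 1) acc (by omega)]
    · simp [dif_neg h1]

lemma rilScanR_append (l : List Char) (W : Nat) (r : Int) (i : Nat) (acc : List (Int × Int)) :
    rilScanR l W r i acc = acc ++ rilScanR l W r i [] :=
  rilScanR_acc l W r (W - i) i acc le_rfl

lemma rilScanR_eq (l : List Char) (W : Nat) (r : Int) :
    ∀ n i, W - i ≤ n →
      rilScanR l W r i [] =
        ((List.range' (i + 1) (W - (i + 1))).filter
          (fun d => (l.getD d ' ' == '.') && (rilWC l (d + 1) == rilWC l (i + 1)))).map
          (fun (d : Nat) => (r, (d : Int))) := by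
  intro n
  induction n with
  | zero =>
    intro i h
    have hn : ¬ (i + 1 < W) := by omega
    have h0 : W - (i + 1) = 0 := by omega
    rw [rilScanR]
    simp [hn, h0]
  | succ n ih =>
    intro i h
    rw [rilScanR]
    by_cases h1 : i + 1 < W
    · simp only [dif_pos h1]
      have hW : W - (i + 1) = (W - (i + 1 + 1)) + 1 := by omega
      rw [hW, List.range'_succ, List.filter_cons]
      by_cases hw : rilWall (l.getD (i + 1) ' ')
      · simp only [hw, if_true, rilWall_ne_dot hw, Bool.false_and,
          Bool.false_eq_true, if_false]
        have hnil : (List.range' (i + 1 + 1) (W - (i + 1 + 1))).filter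
            (fun d => (l.getD d ' ' == '.') && (rilWC l (d + 1) == rilWC l (i + 1))) = [] := by
          rw [List.filter_eq_nil_iff]
          intro a ha
          have hmem := List.mem_range'_1.mp ha
          simp only [Bool.and_eq_true, beq_iff_eq, not_and]
          intro _
          have h2 : rilWC l (i + 1 + 1) ≤ rilWC l (a + 1) := rilWC_mono l (by omega)
          have h3 := rilWC_succ l (i + 1)
          rw [if_pos hw] at h3
          omega
        rw [hnil]
        simp
      · have hwc : rilWC l (i + 1 + 1) = rilWC l (i + 1) := by
          rw [rilWC_succ, if_neg hw]
          omega
        by_cases hd : l.getD (i + 1) ' ' == '.'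
        · simp only [hw, Bool.false_eq_true, if_false, hd, if_true, hwc,
            beq_self_eq_true, Bool.and_true]
          rw [rilScanR_append, ih (i + 1) (by omega), hwc]
          simp
        · simp only [hw, Bool.false_eq_true, if_false, hd, Bool.false_and]
          rw [ih (i + 1) (by omega), hwc]
    · simp only [dif_neg h1]
      have h0 : W - (i + 1) = 0 := by omega
      simp [h0]

lemma rilScanL_append (l : List Char) (r : Int) :
    ∀ (j : Nat) (acc : List (Int × Int)), rilScanL l r j acc = acc ++ rilScanL l r j [] := by
  intro j
  induction j with
  | zero => intro acc; simp [rilScanL]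
  | succ j ih =>
    intro acc
    rw [rilScanL]; conv_rhs => rw [rilScanL]
    by_cases hw : rilWall (l.getD j ' ')
    · simp only [hw, if_true, List.append_nil]
    · by_cases hd : l.getD j ' ' == '.'
      · simp only [hw, Bool.false_eq_true, if_false, hd, if_true]
        rw [ih (acc ++ [(r, (j : Int))]), ih ([] ++ [(r, (j : Int))])]
        simp
      · simp only [hw, Bool.false_eq_true, if_false, hd]
        rw [ih acc]

lemma rilScanL_eq (l : List Char) (r : Int) :
    ∀ j, rilScanL l r j [] =
      (((List.range j).filter
        (fun d => (l.getD d ' ' == '.') && (rilWC l (d + 1) == rilWC l j))).reverse).map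
        (fun (d : Nat) => (r, (d : Int))) := by
  intro j
  induction j with
  | zero => simp [rilScanL]
  | succ j ih =>
    rw [rilScanL, List.range_succ, List.filter_append, List.filter_cons]
    by_cases hw : rilWall (l.getD j ' ')
    · have hnil : (List.range j).filter
          (fun d => (l.getD d ' ' == '.') && (rilWC l (d + 1) == rilWC l (j + 1))) = [] := by
        rw [List.filter_eq_nil_iff]
        intro a ha
        have ha' := List.mem_range.mp ha
        simp only [Bool.and_eq_true, beq_iff_eq, not_and]
        intro _
        have h2 : rilWC l (a + 1) ≤ rilWC l j := rilWC_mono l (by omega)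
        have h3 := rilWC_succ l j
        rw [if_pos hw] at h3
        omega
      simp only [hw, if_true, hnil, rilWall_ne_dot hw, Bool.false_and,
        Bool.false_eq_true, if_false, List.filter_nil, List.append_nil, List.reverse_nil,
        List.map_nil]
    · have hwc : rilWC l (j + 1) = rilWC l j := by
        rw [rilWC_succ, if_neg hw]
        omega
      by_cases hd : l.getD j ' ' == '.'
      · simp only [hw, Bool.false_eq_true, if_false, hd, if_true, hwc,
          beq_self_eq_true, Bool.and_true, List.filter_nil, List.reverse_append,
          List.reverse_cons, List.reverse_nil, List.nil_append, List.singleton_append,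
          List.map_cons]
        rw [rilScanL_append, ih]
        simp
      · simp only [hw, Bool.false_eq_true, if_false, hd, Bool.false_and, hwc,
          List.filter_nil, List.append_nil]
        exact ih

-- ---- B-side characterisations ----

lemma rilSegState (l : List Char) (k : Nat) :
    (List.range k).foldl
      (fun (st : Nat × List Nat) c =>
        let sid := if rilWall (l.getD c ' ') then st.1 + 1 else st.1
        (sid, st.2 ++ [sid]))
      (0, [])
    = (rilWC l k, (List.range k).map (fun c => rilWC l (c + 1))) := by
  induction k with
  | zero => simp [rilWC]
  | succ k ih =>
    rw [List.range_succ, List.foldl_append, ih]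
    have hsid : (if rilWall (l.getD k ' ') then rilWC l k + 1 else rilWC l k)
        = rilWC l (k + 1) := by
      rw [rilWC_succ]; split <;> omega
    simp only [List.getD_eq_getElem?_getD] at hsid
    simp [hsid]

lemma rilSeg_getD (l : List Char) (W c : Nat) (h : c < W) :
    (rilSeg l W).getD c 0 = rilWC l (c + 1) := by
  unfold rilSeg
  rw [rilSegState]
  exact PySem.List.getD_map_range _ W c 0 h

lemma rilDots_getD (l : List Char) (W : Nat) (s : Nat) :
    (rilDots l W (rilSeg l W)).getD s []
      = (List.range W).filter
          (fun c => (l.getD c ' ' == '.') && (rilWC l (c + 1) == s)) := by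
  unfold rilDots
  have e0 : (List.range W).foldl
        (fun (d : PySem.Dict Nat (List Nat)) c =>
          if l.getD c ' ' == '.' then d.modify ((rilSeg l W).getD c 0) [] (fun v => v ++ [c])
          else d)
        PySem.Dict.empty
      = ((List.range W).filter (fun c => l.getD c ' ' == '.')).foldl
        (fun (d : PySem.Dict Nat (List Nat)) c =>
          d.modify ((rilSeg l W).getD c 0) [] (fun v => v ++ [c]))
        PySem.Dict.empty := (List.foldl_filter).symm
  have e1 : ((List.range W).filter (fun c => l.getD c ' ' == '.')).foldl
        (fun (d : PySem.Dict Nat (List Nat)) c =>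
          d.modify ((rilSeg l W).getD c 0) [] (fun v => v ++ [c]))
        PySem.Dict.empty
      = ((((List.range W).filter (fun c => l.getD c ' ' == '.')).map
          (fun c => ((rilSeg l W).getD c 0, c))).foldl
        (fun (d : PySem.Dict Nat (List Nat)) (p : Nat × Nat) =>
          d.modify p.1 [] (fun v => v ++ [p.2]))
        PySem.Dict.empty) :=
    (List.foldl_map (f := fun c => ((rilSeg l W).getD c 0, c))
      (g := fun (d : PySem.Dict Nat (List Nat)) (p : Nat × Nat) =>
        d.modify p.1 [] (fun v => v ++ [p.2]))).symm
  rw [e0, e1, PySem.Dict.getD_foldl_modify_append, PySem.Dict.getD_empty, List.filter_map,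
    List.map_map]
  have hcomp : ((fun (p : Nat × Nat) => p.2) ∘ (fun c => ((rilSeg l W).getD c 0, c)))
      = fun (c : Nat) => c := rfl
  rw [hcomp, List.map_id', List.filter_filter, List.nil_append]
  apply List.filter_congr
  intro c hc
  have hc' : c < W := List.mem_range.mp hc
  simp only [Function.comp_apply, rilSeg_getD l W c hc']
  exact Bool.and_comm _ _

-- ---- assembly ----

def rilOutB (hm : List String) (r c : Nat) : List (Int × Int) :=
  ((rilDs hm r c).filter (fun d => decide (c < d))).map (fun (d : Nat) => ((r : Int), (d : Int)))
    ++ ((rilDs hm r c).reverse.filter (fun d => decide (d < c))).map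
        (fun (d : Nat) => ((r : Int), (d : Int)))

lemma rilEmit_eq (hm : List String) (r c : Nat) (acc : List (Int × Int)) :
    rilEmit hm r c acc = acc ++ rilOutB hm r c := by
  unfold rilEmit rilOutB
  have hR := PySem.List.foldl_append_if (fun d => decide (c < d))
    (fun (d : Nat) => ((r : Int), (d : Int))) (rilDs hm r c) acc
  have hL := PySem.List.foldl_append_if (fun d => decide (d < c))
    (fun (d : Nat) => ((r : Int), (d : Int))) (rilDs hm r c).reverse
    (acc ++ ((rilDs hm r c).filter (fun d => decide (c < d))).map
      (fun (d : Nat) => ((r : Int), (d : Int))))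
  simp only [decide_eq_true_eq] at hR hL
  rw [hR, hL, List.append_assoc]

lemma rilDs_eq (hm : List String) (r c : Nat) (hr : r < hm.length)
    (hc : c < (hm.headD "").toList.length) :
    rilDs hm r c
      = (List.range (hm.headD "").toList.length).filter
          (fun d => ((hm.getD r "").toList.getD d ' ' == '.')
            && (rilWC (hm.getD r "").toList (d + 1) == rilWC (hm.getD r "").toList (c + 1))) := by
  unfold rilDs rilRows
  rw [PySem.List.getD_map_of_lt _ hm r ([], PySem.Dict.empty) hr,
    ← List.getD_eq_getElem hm "" hr]
  show (rilDots (hm.getD r "").toList (hm.headD "").toList.length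
      (rilSeg (hm.getD r "").toList (hm.headD "").toList.length)).getD
    ((rilSeg (hm.getD r "").toList (hm.headD "").toList.length).getD c 0) [] = _
  rw [rilSeg_getD _ _ _ hc, rilDots_getD]

lemma rowA_flatMap (hm : List String) :
    row_invalid_list hm = (rilLocP hm).flatMap (fun rc =>
      rilScanR (hm.getD rc.1 "").toList (hm.headD "").toList.length (rc.1 : Int) rc.2 []
        ++ rilScanL (hm.getD rc.1 "").toList (rc.1 : Int) rc.2 []) := by
  unfold row_invalid_list
  show (rilLocP hm).foldl
      (fun acc rc =>
        rilScanL (hm.getD rc.1 "").toList (rc.1 : Int) rc.2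
          (rilScanR (hm.getD rc.1 "").toList (hm.headD "").toList.length (rc.1 : Int) rc.2 acc))
      [] = _
  rw [show (fun (acc : List (Int × Int)) (rc : Nat × Nat) =>
        rilScanL (hm.getD rc.1 "").toList (rc.1 : Int) rc.2
          (rilScanR (hm.getD rc.1 "").toList (hm.headD "").toList.length (rc.1 : Int) rc.2 acc))
      = (fun acc rc => acc ++
          (rilScanR (hm.getD rc.1 "").toList (hm.headD "").toList.length (rc.1 : Int) rc.2 []
            ++ rilScanL (hm.getD rc.1 "").toList (rc.1 : Int) rc.2 [])) from by
    funext acc rc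
    rw [rilScanR_append, rilScanL_append, List.append_assoc]]
  rw [PySem.List.foldl_append_eq_flatMap, List.nil_append]

lemma filterMap_if_flatMap {α β γ : Type} (l : List α) (p : α → Bool) (q : α → β)
    (g : β → List γ) :
    (l.filterMap (fun x => if p x then some (q x) else none)).flatMap g
      = l.flatMap (fun x => if p x then g (q x) else []) := by
  induction l with
  | nil => rfl
  | cons a t ih =>
    by_cases h : p a <;> simp [h, ih]

lemma locP_flatMap (hm : List String) (g : Nat × Nat → List (Int × Int)) :
    (rilLocP hm).flatMap g
      = (List.range (hm.headD "").toList.length).flatMap (fun c =>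
          (List.range hm.length).flatMap (fun r =>
            if (hm.getD r "").toList.getD c ' ' == 'p' then g (r, c) else [])) := by
  unfold rilLocP
  rw [List.flatMap_assoc]
  apply List.flatMap_congr
  intro c _
  exact filterMap_if_flatMap _ _ _ _

lemma rowB_flatMap (hm : List String) :
    row_invalid_list_alt hm
      = (List.range (hm.headD "").toList.length).flatMap (fun c =>
          (List.range hm.length).flatMap (fun r =>
            if (hm.getD r "").toList.getD c ' ' == 'p' then rilOutB hm r c else [])) := by
  unfold row_invalid_list_alt
  have hstep : ∀ (c : Nat),
      (fun (acc2 : List (Int × Int)) (r : Nat) =>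
        if (hm.getD r "").toList.getD c ' ' == 'p' then rilEmit hm r c acc2 else acc2)
      = (fun acc2 r => acc2 ++
          (if (hm.getD r "").toList.getD c ' ' == 'p' then rilOutB hm r c else [])) := by
    intro c
    funext acc2 r
    by_cases hp : (hm.getD r "").toList.getD c ' ' == 'p'
    · simp only [hp, if_true]
      exact rilEmit_eq hm r c acc2
    · rw [if_neg hp, if_neg hp, List.append_nil]
  rw [show (fun (acc : List (Int × Int)) (c : Nat) =>
        (List.range hm.length).foldl
          (fun acc2 r =>
            if (hm.getD r "").toList.getD c ' ' == 'p' then rilEmit hm r c acc2 else acc2)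
          acc)
      = (fun acc c => acc ++ (List.range hm.length).flatMap (fun r =>
          if (hm.getD r "").toList.getD c ' ' == 'p' then rilOutB hm r c else [])) from by
    funext acc c
    rw [hstep c, PySem.List.foldl_append_eq_flatMap]]
  rw [PySem.List.foldl_append_eq_flatMap, List.nil_append]

lemma filter_range_gt (W c : Nat) (q : Nat → Bool) (hc : c < W) :
    (List.range W).filter (fun d => decide (c < d) && q d)
      = (List.range' (c + 1) (W - (c + 1))).filter q := by
  have hsplit : List.range W = List.range' 0 (c + 1) ++ List.range' (c + 1) (W - (c + 1)) := by
    rw [List.range_eq_range',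
      show List.range' (c + 1) (W - (c + 1)) = List.range' (0 + (c + 1)) (W - (c + 1)) by
        norm_num,
      List.range'_append_1]
    congr 1
    omega
  rw [hsplit, List.filter_append]
  have h1 : (List.range' 0 (c + 1)).filter (fun d => decide (c < d) && q d) = [] := by
    rw [List.filter_eq_nil_iff]
    intro a ha
    have := List.mem_range'_1.mp ha
    simp only [Bool.and_eq_true, decide_eq_true_eq, not_and]
    intro h
    omega
  have h2 : (List.range' (c + 1) (W - (c + 1))).filter (fun d => decide (c < d) && q d)
      = (List.range' (c + 1) (W - (c + 1))).filter q := by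
    apply List.filter_congr
    intro a ha
    have h3 := List.mem_range'_1.mp ha
    have h4 : c < a := by omega
    simp [h4]
  rw [h1, h2, List.nil_append]

lemma filter_range_lt (W c : Nat) (q : Nat → Bool) (hc : c ≤ W) :
    (List.range W).filter (fun d => decide (d < c) && q d)
      = (List.range c).filter q := by
  have hsplit : List.range W = List.range' 0 c ++ List.range' c (W - c) := by
    rw [List.range_eq_range',
      show List.range' c (W - c) = List.range' (0 + c) (W - c) by norm_num,
      List.range'_append_1]
    congr 1
    omega
  rw [hsplit, List.filter_append]
  have h1 : (List.range' c (W - c)).filter (fun d => decide (d < c) && q d) = [] := by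
    rw [List.filter_eq_nil_iff]
    intro a ha
    have := List.mem_range'_1.mp ha
    simp only [Bool.and_eq_true, decide_eq_true_eq, not_and]
    intro h
    omega
  have h2 : (List.range' 0 c).filter (fun d => decide (d < c) && q d)
      = (List.range' 0 c).filter q := by
    apply List.filter_congr
    intro a ha
    have h3 := List.mem_range'_1.mp ha
    have h4 : a < c := by omega
    simp [h4]
  rw [h1, h2, List.append_nil, ← List.range_eq_range']

lemma out_eq (hm : List String) (r c : Nat) (hr : r < hm.length)
    (hc : c < (hm.headD "").toList.length)
    (hp : ((hm.getD r "").toList.getD c ' ' == 'p') = true) :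
    rilOutB hm r c
      = rilScanR (hm.getD r "").toList (hm.headD "").toList.length (r : Int) c []
        ++ rilScanL (hm.getD r "").toList (r : Int) c [] := by
  have hpc : (hm.getD r "").toList.getD c ' ' = 'p' := by
    simpa using hp
  have hwall : rilWall ((hm.getD r "").toList.getD c ' ') = false := by
    rw [hpc]; rfl
  have hwc : rilWC (hm.getD r "").toList (c + 1) = rilWC (hm.getD r "").toList c := by
    rw [rilWC_succ, hwall]
    simp
  rw [rilScanR_eq (hm.getD r "").toList _ _ ((hm.headD "").toList.length - c) c (by omega),
    rilScanL_eq]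
  unfold rilOutB
  rw [rilDs_eq hm r c hr hc]
  congr 1
  · rw [List.filter_filter, filter_range_gt _ c _ hc]
  · rw [List.filter_reverse, List.filter_filter, filter_range_lt _ c _ (by omega), hwc]

theorem row_invalid_list_spec : Claim_equal_row_invalid_list := by
  intro hm _ _
  unfold Spec_row_invalid_list
  rw [rowA_flatMap, rowB_flatMap, locP_flatMap]
  apply List.flatMap_congr
  intro c hc
  apply List.flatMap_congr
  intro r hr
  by_cases hp : ((hm.getD r "").toList.getD c ' ' == 'p') = true
  · rw [if_pos hp, if_pos hp]
    exact (out_eq hm r c (List.mem_range.mp hr) (List.mem_range.mp hc) hp).symm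
  · rw [if_neg hp, if_neg hp]
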